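-- pv_equiv track=rewrite | github.com/SparshMody/CS240FinalProject | disassembler.py | bin_to_zap
-- ===== SOURCE A (Python) =====
-- op_codes = {
--     "000000": "add",
--     "000001": "sub",
--     "000010": "and",
--     "000011": "or",
--     "000100": "slt",
--     "100011": "lw",
--     "101011": "sw",
--     "000101": "beq",
--     "000110": "jump",
--     "000111": "mov",
--     "001000": "xor",
--     "001001": "load",
--     "001010": "store",
-- }
--
-- fun_opcodes = {
--     "0100000000000000": "clap",
--     "0100000100000000": "incz",
--     "0100011000000000": "dump",
--     "0100011100000000": "halt",
-- }
--
-- prefix_ops = {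
--     "01000010": "rnd",
--     "01000011": "swap",
--     "01000100": "fzbz",
--     "01000101": "emit",
--     "01001000": "shl",
--     "01001001": "shr",
-- }
--
-- registers = {
--     "0000": "r0",
--     "0001": "r1",
--     "0010": "r2",
--     "0011": "r3",
--     "0100": "r4",
--     "0101": "r5",
--     "0110": "r6",
--     "0111": "r7",
--     "1000": "pc",
--     "1001": "sp",
--     "1010": "zf",
--     "1011": "rnd"
-- }
--
-- def bin_to_zap(line):
--     if line in fun_opcodes:
--         return fun_opcodes[line]
--
--     for prefix, name in prefix_ops.items():
--         if line.startswith(prefix):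
--             if name in ["fzbz", "emit", "rnd"]:
--                 reg = line[8:12]
--                 return f"{name} {registers[reg]}"
--             elif name == "swap":
--                 reg1 = line[8:12]
--                 reg2 = line[12:16]
--                 return f"swap {registers[reg1]}, {registers[reg2]}"
--             elif name in ["shl", "shr"]:
--                 reg = line[8:12]
--                 imm = int(line[12:], 2)
--                 return f"{name} {registers[reg]}, {imm}"
--
--     op_code = line[0:6]
--
--     # R-type
--     if op_code in ["000000", "000001", "000010", "000011", "000100", "001000"]:
--         rs = line[6:10]
--         rt = line[10:14]
--         rd = line[14:18]
--         return f"{op_codes[op_code]} {registers[rd]}, {registers[rs]}, {registers[rt]}"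
--
--     # I-type
--     if op_code in ["000111"]:  # mov
--         reg = line[6:10]
--         imm = int(line[10:], 2)
--         return f"mov {registers[reg]}, {imm}"
--
--     if op_code in ["100011", "101011"]:  # lw, sw
--         rs = line[6:10]
--         rt = line[10:14]
--         offset = int(line[14:], 2)
--         return f"{op_codes[op_code]} {registers[rt]}, {offset}({registers[rs]})"
--
--     if op_code == "000101":  # beq
--         rs = line[6:10]
--         rt = line[10:14]
--         offset = int(line[14:], 2)
--         return f"beq {registers[rs]}, {registers[rt]}, {offset}"
--
--     if op_code == "000110":  # jump
--         addr = int(line[6:], 2)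
--         return f"jump {addr}"
--
--     return f"UNKNOWN {line}"
-- ===== SOURCE B (Python) =====
-- op_codes = {
--     "000000": "add",
--     "000001": "sub",
--     "000010": "and",
--     "000011": "or",
--     "000100": "slt",
--     "100011": "lw",
--     "101011": "sw",
--     "000101": "beq",
--     "000110": "jump",
--     "000111": "mov",
--     "001000": "xor",
--     "001001": "load",
--     "001010": "store",
-- }
--
-- fun_opcodes = {
--     "0100000000000000": "clap",
--     "0100000100000000": "incz",
--     "0100011000000000": "dump",
--     "0100011100000000": "halt",
-- }
--
-- registers = {
--     "0000": "r0",
--     "0001": "r1",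
--     "0010": "r2",
--     "0011": "r3",
--     "0100": "r4",
--     "0101": "r5",
--     "0110": "r6",
--     "0111": "r7",
--     "1000": "pc",
--     "1001": "sp",
--     "1010": "zf",
--     "1011": "rnd"
-- }
--
-- # One table of render specs: key -> list of tokens.
-- # A token is a literal string, ("r", a, b) = registers[line[a:b]], or ("i", a) = str(int(line[a:], 2)).
-- SPECS = {
--     "01000010": ["rnd ", ("r", 8, 12)],
--     "01000011": ["swap ", ("r", 8, 12), ", ", ("r", 12, 16)],
--     "01000100": ["fzbz ", ("r", 8, 12)],
--     "01000101": ["emit ", ("r", 8, 12)],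
--     "01001000": ["shl ", ("r", 8, 12), ", ", ("i", 12)],
--     "01001001": ["shr ", ("r", 8, 12), ", ", ("i", 12)],
--     "000000": ["add ", ("r", 14, 18), ", ", ("r", 6, 10), ", ", ("r", 10, 14)],
--     "000001": ["sub ", ("r", 14, 18), ", ", ("r", 6, 10), ", ", ("r", 10, 14)],
--     "000010": ["and ", ("r", 14, 18), ", ", ("r", 6, 10), ", ", ("r", 10, 14)],
--     "000011": ["or ", ("r", 14, 18), ", ", ("r", 6, 10), ", ", ("r", 10, 14)],
--     "000100": ["slt ", ("r", 14, 18), ", ", ("r", 6, 10), ", ", ("r", 10, 14)],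
--     "001000": ["xor ", ("r", 14, 18), ", ", ("r", 6, 10), ", ", ("r", 10, 14)],
--     "000111": ["mov ", ("r", 6, 10), ", ", ("i", 10)],
--     "100011": ["lw ", ("r", 10, 14), ", ", ("i", 14), "(", ("r", 6, 10), ")"],
--     "101011": ["sw ", ("r", 10, 14), ", ", ("i", 14), "(", ("r", 6, 10), ")"],
--     "000101": ["beq ", ("r", 6, 10), ", ", ("r", 10, 14), ", ", ("i", 14)],
--     "000110": ["jump ", ("i", 6)],
-- }
--
-- def _render(line, tok):
--     if isinstance(tok, str):
--         return tok
--     if tok[0] == "r":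
--         return registers[line[tok[1]:tok[2]]]
--     return str(int(line[tok[1]:], 2))
--
-- def bin_to_zap(line):
--     if line in fun_opcodes:
--         return fun_opcodes[line]
--     for key in (line[:8], line[:6]):
--         if key in SPECS:
--             return "".join(_render(line, tok) for tok in SPECS[key])
--     return f"UNKNOWN {line}"
-- ===== Notes on version B (the rewrite author's own statement) =====
-- stated objective: idiomatic
-- what changed: Replaces the prefix loop and the if/elif opcode cascade with one table of declarative field specs (literal / register-slice / immediate tokens) interpreted by a single generic renderer, dispatched by looking up line[:8] then line[:6] in that table.
import Mathlib
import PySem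

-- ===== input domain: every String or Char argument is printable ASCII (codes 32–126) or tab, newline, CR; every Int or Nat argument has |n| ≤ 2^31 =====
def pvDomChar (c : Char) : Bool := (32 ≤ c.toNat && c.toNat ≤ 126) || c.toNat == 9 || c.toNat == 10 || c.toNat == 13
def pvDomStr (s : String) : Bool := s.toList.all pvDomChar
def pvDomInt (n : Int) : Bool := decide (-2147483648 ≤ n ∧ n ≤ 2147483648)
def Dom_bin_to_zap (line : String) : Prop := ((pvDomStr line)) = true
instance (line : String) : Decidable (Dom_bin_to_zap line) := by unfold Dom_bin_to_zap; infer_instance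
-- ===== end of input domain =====

-- B replaces A's prefix loop and if/elif opcode cascade by one table of declarative
-- field specs interpreted by a single generic renderer (objective: idiomatic, same cost).

-- shared module-level data (the Python module's dicts)
def pvFunOps : PySem.Dict (List Char) (List Char) := PySem.Dict.mk
  [("0100000000000000".toList, "clap".toList), ("0100000100000000".toList, "incz".toList),
   ("0100011000000000".toList, "dump".toList), ("0100011100000000".toList, "halt".toList)]

def pvRegs : PySem.Dict (List Char) (List Char) := PySem.Dict.mk
  [("0000".toList, "r0".toList), ("0001".toList, "r1".toList), ("0010".toList, "r2".toList),
   ("0011".toList, "r3".toList), ("0100".toList, "r4".toList), ("0101".toList, "r5".toList),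
   ("0110".toList, "r6".toList), ("0111".toList, "r7".toList), ("1000".toList, "pc".toList),
   ("1001".toList, "sp".toList), ("1010".toList, "zf".toList), ("1011".toList, "rnd".toList)]

-- registers[r] (KeyError excluded by Pre_) and int(t, 2) (ValueError excluded by Pre_)
def pvRegLookup (r : List Char) : List Char := PySem.Dict.getD pvRegs r []
def pvImm (t : List Char) : Int := (PySem.Int.ofCharsBase? t 2).getD 0

-- ===== PORT A =====
def pvOpCodes : PySem.Dict (List Char) (List Char) := PySem.Dict.mk
  [("000000".toList, "add".toList), ("000001".toList, "sub".toList), ("000010".toList, "and".toList),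
   ("000011".toList, "or".toList), ("000100".toList, "slt".toList), ("100011".toList, "lw".toList),
   ("101011".toList, "sw".toList), ("000101".toList, "beq".toList), ("000110".toList, "jump".toList),
   ("000111".toList, "mov".toList), ("001000".toList, "xor".toList), ("001001".toList, "load".toList),
   ("001010".toList, "store".toList)]

def pvPrefixOps : List (List Char × List Char) :=
  [("01000010".toList, "rnd".toList), ("01000011".toList, "swap".toList),
   ("01000100".toList, "fzbz".toList), ("01000101".toList, "emit".toList),
   ("01001000".toList, "shl".toList), ("01001001".toList, "shr".toList)]

-- 'for prefix, name in prefix_ops.items(): if line.startswith(prefix): …' (none = fell through)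
def pvPrefixLoop (cs : List Char) : List (List Char × List Char) → Option (List Char)
  | [] => none
  | (pfx, name) :: rest =>
    if PySem.Chars.startswith cs pfx then
      if name ∈ ["fzbz".toList, "emit".toList, "rnd".toList] then
        some (name ++ " ".toList ++ pvRegLookup (PySem.List.slice cs (some 8) (some 12)))
      else if name = "swap".toList then
        some ("swap ".toList ++ pvRegLookup (PySem.List.slice cs (some 8) (some 12)) ++
              ", ".toList ++ pvRegLookup (PySem.List.slice cs (some 12) (some 16)))
      else if name ∈ ["shl".toList, "shr".toList] then
        some (name ++ " ".toList ++ pvRegLookup (PySem.List.slice cs (some 8) (some 12)) ++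
              ", ".toList ++ PySem.Int.toChars (pvImm (PySem.List.slice cs (some 12) none)))
      else pvPrefixLoop cs rest
    else pvPrefixLoop cs rest

def bin_to_zap (line : String) : String :=
  let cs := line.toList
  match PySem.Dict.get? pvFunOps cs with
  | some v => String.ofList v
  | none =>
    match pvPrefixLoop cs pvPrefixOps with
    | some r => String.ofList r
    | none =>
      let op := PySem.List.slice cs (some 0) (some 6)
      if op ∈ ["000000".toList, "000001".toList, "000010".toList, "000011".toList,
               "000100".toList, "001000".toList] then
        let rs := PySem.List.slice cs (some 6) (some 10)
        let rt := PySem.List.slice cs (some 10) (some 14)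
        let rd := PySem.List.slice cs (some 14) (some 18)
        String.ofList (PySem.Dict.getD pvOpCodes op [] ++ " ".toList ++ pvRegLookup rd ++
          ", ".toList ++ pvRegLookup rs ++ ", ".toList ++ pvRegLookup rt)
      else if op ∈ ["000111".toList] then
        let reg := PySem.List.slice cs (some 6) (some 10)
        let imm := pvImm (PySem.List.slice cs (some 10) none)
        String.ofList ("mov ".toList ++ pvRegLookup reg ++ ", ".toList ++ PySem.Int.toChars imm)
      else if op ∈ ["100011".toList, "101011".toList] then
        let rs := PySem.List.slice cs (some 6) (some 10)
        let rt := PySem.List.slice cs (some 10) (some 14)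
        let offset := pvImm (PySem.List.slice cs (some 14) none)
        String.ofList (PySem.Dict.getD pvOpCodes op [] ++ " ".toList ++ pvRegLookup rt ++
          ", ".toList ++ PySem.Int.toChars offset ++ "(".toList ++ pvRegLookup rs ++ ")".toList)
      else if op = "000101".toList then
        let rs := PySem.List.slice cs (some 6) (some 10)
        let rt := PySem.List.slice cs (some 10) (some 14)
        let offset := pvImm (PySem.List.slice cs (some 14) none)
        String.ofList ("beq ".toList ++ pvRegLookup rs ++ ", ".toList ++ pvRegLookup rt ++
          ", ".toList ++ PySem.Int.toChars offset)
      else if op = "000110".toList then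
        let addr := pvImm (PySem.List.slice cs (some 6) none)
        String.ofList ("jump ".toList ++ PySem.Int.toChars addr)
      else
        String.ofList ("UNKNOWN ".toList ++ cs)

-- ===== PORT B =====
inductive PvTok : Type
  | lit : List Char → PvTok          -- a literal piece of the template
  | reg : Int → Int → PvTok          -- registers[line[a:b]]
  | imm : Int → PvTok                -- str(int(line[a:], 2))
deriving DecidableEq, Repr

def pvSpecs : PySem.Dict (List Char) (List PvTok) := PySem.Dict.mk
  [("01000010".toList, [.lit "rnd ".toList, .reg 8 12]),
   ("01000011".toList, [.lit "swap ".toList, .reg 8 12, .lit ", ".toList, .reg 12 16]),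
   ("01000100".toList, [.lit "fzbz ".toList, .reg 8 12]),
   ("01000101".toList, [.lit "emit ".toList, .reg 8 12]),
   ("01001000".toList, [.lit "shl ".toList, .reg 8 12, .lit ", ".toList, .imm 12]),
   ("01001001".toList, [.lit "shr ".toList, .reg 8 12, .lit ", ".toList, .imm 12]),
   ("000000".toList, [.lit "add ".toList, .reg 14 18, .lit ", ".toList, .reg 6 10, .lit ", ".toList, .reg 10 14]),
   ("000001".toList, [.lit "sub ".toList, .reg 14 18, .lit ", ".toList, .reg 6 10, .lit ", ".toList, .reg 10 14]),
   ("000010".toList, [.lit "and ".toList, .reg 14 18, .lit ", ".toList, .reg 6 10, .lit ", ".toList, .reg 10 14]),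
   ("000011".toList, [.lit "or ".toList, .reg 14 18, .lit ", ".toList, .reg 6 10, .lit ", ".toList, .reg 10 14]),
   ("000100".toList, [.lit "slt ".toList, .reg 14 18, .lit ", ".toList, .reg 6 10, .lit ", ".toList, .reg 10 14]),
   ("001000".toList, [.lit "xor ".toList, .reg 14 18, .lit ", ".toList, .reg 6 10, .lit ", ".toList, .reg 10 14]),
   ("000111".toList, [.lit "mov ".toList, .reg 6 10, .lit ", ".toList, .imm 10]),
   ("100011".toList, [.lit "lw ".toList, .reg 10 14, .lit ", ".toList, .imm 14, .lit "(".toList, .reg 6 10, .lit ")".toList]),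
   ("101011".toList, [.lit "sw ".toList, .reg 10 14, .lit ", ".toList, .imm 14, .lit "(".toList, .reg 6 10, .lit ")".toList]),
   ("000101".toList, [.lit "beq ".toList, .reg 6 10, .lit ", ".toList, .reg 10 14, .lit ", ".toList, .imm 14]),
   ("000110".toList, [.lit "jump ".toList, .imm 6])]

def pvRenderTok (cs : List Char) : PvTok → List Char
  | .lit s => s
  | .reg a b => pvRegLookup (PySem.List.slice cs (some a) (some b))
  | .imm a => PySem.Int.toChars (pvImm (PySem.List.slice cs (some a) none))

def pvRender (cs : List Char) (spec : List PvTok) : List Char :=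
  (spec.map (pvRenderTok cs)).flatten

-- 'for key in (line[:8], line[:6]): if key in SPECS: return …'
def pvDispatch (cs : List Char) : List (List Char) → Option (List Char)
  | [] => none
  | k :: ks =>
    match PySem.Dict.get? pvSpecs k with
    | some spec => some (pvRender cs spec)
    | none => pvDispatch cs ks

def bin_to_zap_alt (line : String) : String :=
  let cs := line.toList
  match PySem.Dict.get? pvFunOps cs with
  | some v => String.ofList v
  | none =>
    match pvDispatch cs [PySem.List.slice cs none (some 8), PySem.List.slice cs none (some 6)] with
    | some r => String.ofList r
    | none => String.ofList ("UNKNOWN ".toList ++ cs)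

-- ===== PRECONDITION & SPEC =====
def pvRegKeys : List (List Char) :=
  ["0000".toList, "0001".toList, "0010".toList, "0011".toList, "0100".toList, "0101".toList,
   "0110".toList, "0111".toList, "1000".toList, "1001".toList, "1010".toList, "1011".toList]

-- Pre_ excludes exactly the inputs on which the Python A raises: a matched prefix/opcode
-- whose register field is not a register key (KeyError) or whose immediate tail is not a
-- valid base-2 int literal (ValueError).
def Pre_bin_to_zap (line : String) : Prop :=
  let cs := line.toList
  let t8 := cs.take 8
  let op := cs.take 6
  if cs ∈ ["0100000000000000".toList, "0100000100000000".toList,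
           "0100011000000000".toList, "0100011100000000".toList] then True
  else if t8 ∈ ["01000010".toList, "01000100".toList, "01000101".toList] then
    (cs.drop 8).take 4 ∈ pvRegKeys
  else if t8 = "01000011".toList then
    (cs.drop 8).take 4 ∈ pvRegKeys ∧ (cs.drop 12).take 4 ∈ pvRegKeys
  else if t8 ∈ ["01001000".toList, "01001001".toList] then
    (cs.drop 8).take 4 ∈ pvRegKeys ∧ (PySem.Int.ofCharsBase? (cs.drop 12) 2).isSome = true
  else if op ∈ ["000000".toList, "000001".toList, "000010".toList, "000011".toList,
                "000100".toList, "001000".toList] then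
    (cs.drop 6).take 4 ∈ pvRegKeys ∧ (cs.drop 10).take 4 ∈ pvRegKeys ∧
    (cs.drop 14).take 4 ∈ pvRegKeys
  else if op = "000111".toList then
    (cs.drop 6).take 4 ∈ pvRegKeys ∧ (PySem.Int.ofCharsBase? (cs.drop 10) 2).isSome = true
  else if op ∈ ["100011".toList, "101011".toList] then
    (cs.drop 6).take 4 ∈ pvRegKeys ∧ (cs.drop 10).take 4 ∈ pvRegKeys ∧
    (PySem.Int.ofCharsBase? (cs.drop 14) 2).isSome = true
  else if op = "000101".toList then
    (cs.drop 6).take 4 ∈ pvRegKeys ∧ (cs.drop 10).take 4 ∈ pvRegKeys ∧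
    (PySem.Int.ofCharsBase? (cs.drop 14) 2).isSome = true
  else if op = "000110".toList then
    (PySem.Int.ofCharsBase? (cs.drop 6) 2).isSome = true
  else True

instance (line : String) : Decidable (Pre_bin_to_zap line) := by
  unfold Pre_bin_to_zap; infer_instance

def pvWitness_bin_to_zap : String := "000110001100"

def Spec_bin_to_zap (line : String) (out : String) : Prop := out = bin_to_zap_alt line
instance (line : String) (out : String) : Decidable (Spec_bin_to_zap line out) := by
  unfold Spec_bin_to_zap; infer_instance

-- ===== CLAIM (what is proved, stated in full; the proofs are below) =====
def Claim_equal_bin_to_zap : Prop := ∀ (line : String), Dom_bin_to_zap line → Pre_bin_to_zap line → Spec_bin_to_zap line (bin_to_zap line)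

-- ===== LEMMAS AND PROOFS =====

lemma pv_take_eq_of_eq_short {cs K : List Char} {n : ℕ} (h : cs.take n = K)
    (hK : K.length < n) : cs = K := by
  have hl := congrArg List.length h
  rw [List.length_take] at hl
  have hle : cs.length ≤ n := by omega
  rwa [List.take_of_length_le hle] at h

lemma pv_take_ne_of_length_lt {cs K : List Char} {n : ℕ} (hK : n < K.length) :
    cs.take n ≠ K := by
  intro h
  have hl := congrArg List.length h
  rw [List.length_take] at hl
  omega

lemma pv_sw {cs p : List Char} {n : ℕ} (hl : p.length = n) :
    PySem.Chars.startswith cs p = true ↔ cs.take n = p := by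
  subst hl
  constructor
  · intro h
    simp only [pysem] at h
    exact (List.prefix_iff_eq_take.mp h).symm
  · intro h
    simp only [pysem]
    exact List.prefix_iff_eq_take.mpr h.symm

lemma pv_sw_false {cs p : List Char} {n : ℕ} (hl : p.length = n) (h : cs.take n ≠ p) :
    PySem.Chars.startswith cs p = false := by
  rw [Bool.eq_false_iff]
  intro hs
  exact h ((pv_sw hl).mp hs)

lemma pv_sw_take (cs p : List Char) :
    PySem.Chars.startswith cs p = (cs.take p.length == p) := by
  by_cases hb : cs.take p.length = p
  · rw [(pv_sw rfl).mpr hb, hb]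
    simp
  · rw [pv_sw_false rfl hb]
    symm
    rw [beq_eq_false_iff_ne]
    exact hb

lemma pv_get?_nil {κ ν : Type} [BEq κ] (k : κ) :
    (PySem.Dict.mk ([] : List (κ × ν))).get? k = none := rfl

lemma pv_slice8 (cs : List Char) : PySem.List.slice cs none (some 8) = cs.take 8 := by
  simp [pysem]

lemma pv_slice6 (cs : List Char) : PySem.List.slice cs none (some 6) = cs.take 6 := by
  simp [pysem]

lemma pv_slice06 (cs : List Char) : PySem.List.slice cs (some 0) (some 6) = cs.take 6 := by
  simp [pysem]

-- ===== VERDICT (by name: the statement is the Claim_ definition above) =====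
set_option maxHeartbeats 1600000 in
theorem bin_to_zap_spec : Claim_equal_bin_to_zap := by
  intro line _ _
  unfold Spec_bin_to_zap
  by_cases hfn : line.toList ∈ ["0100000000000000".toList, "0100000100000000".toList, "0100011000000000".toList, "0100011100000000".toList]
  · simp only [List.mem_cons, List.not_mem_nil, or_false] at hfn
    rcases hfn with h|h|h|h <;> rw [String.toList_inj.mp h] <;> decide
  by_cases hq : line.toList ∈ ["000000".toList, "000001".toList, "000010".toList, "000011".toList, "000100".toList, "001000".toList, "000111".toList, "100011".toList, "101011".toList, "000101".toList, "000110".toList]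
  · simp only [List.mem_cons, List.not_mem_nil, or_false] at hq
    rcases hq with h|h|h|h|h|h|h|h|h|h|h <;> rw [String.toList_inj.mp h] <;> decide
  have hf : PySem.Dict.get? pvFunOps line.toList = none := by
    rw [PySem.Dict.get?_eq_none_iff_not_mem_keys]
    intro hm
    simp only [pvFunOps] at hm
    simp only [PySem.Dict.keys_mk, List.map_cons, List.map_nil, List.mem_cons,
      List.not_mem_nil, or_false] at hm
    exact hfn (by simpa using hm)
  simp only [bin_to_zap, bin_to_zap_alt, hf]
  by_cases hp1 : line.toList.take 8 = "01000010".toList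
  · have hp1c : line.toList.take 8 = ['0', '1', '0', '0', '0', '0', '1', '0'] := by simpa using hp1
    rw [pv_slice8 line.toList]
    simp [pvPrefixLoop, pvPrefixOps, pv_sw_take, hp1c, pvDispatch, pvSpecs,
      PySem.Dict.get?_mk_cons, pvRender, pvRenderTok]
  by_cases hp2 : line.toList.take 8 = "01000011".toList
  · have hp2c : line.toList.take 8 = ['0', '1', '0', '0', '0', '0', '1', '1'] := by simpa using hp2
    rw [pv_slice8 line.toList]
    simp [pvPrefixLoop, pvPrefixOps, pv_sw_take, hp2c, pvDispatch, pvSpecs,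
      PySem.Dict.get?_mk_cons, pvRender, pvRenderTok]
  by_cases hp3 : line.toList.take 8 = "01000100".toList
  · have hp3c : line.toList.take 8 = ['0', '1', '0', '0', '0', '1', '0', '0'] := by simpa using hp3
    rw [pv_slice8 line.toList]
    simp [pvPrefixLoop, pvPrefixOps, pv_sw_take, hp3c, pvDispatch, pvSpecs,
      PySem.Dict.get?_mk_cons, pvRender, pvRenderTok]
  by_cases hp4 : line.toList.take 8 = "01000101".toList
  · have hp4c : line.toList.take 8 = ['0', '1', '0', '0', '0', '1', '0', '1'] := by simpa using hp4
    rw [pv_slice8 line.toList]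
    simp [pvPrefixLoop, pvPrefixOps, pv_sw_take, hp4c, pvDispatch, pvSpecs,
      PySem.Dict.get?_mk_cons, pvRender, pvRenderTok]
  by_cases hp5 : line.toList.take 8 = "01001000".toList
  · have hp5c : line.toList.take 8 = ['0', '1', '0', '0', '1', '0', '0', '0'] := by simpa using hp5
    rw [pv_slice8 line.toList]
    simp [pvPrefixLoop, pvPrefixOps, pv_sw_take, hp5c, pvDispatch, pvSpecs,
      PySem.Dict.get?_mk_cons, pvRender, pvRenderTok]
  by_cases hp6 : line.toList.take 8 = "01001001".toList
  · have hp6c : line.toList.take 8 = ['0', '1', '0', '0', '1', '0', '0', '1'] := by simpa using hp6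
    rw [pv_slice8 line.toList]
    simp [pvPrefixLoop, pvPrefixOps, pv_sw_take, hp6c, pvDispatch, pvSpecs,
      PySem.Dict.get?_mk_cons, pvRender, pvRenderTok]
  have hp1c : ¬(line.toList.take 8 = ['0', '1', '0', '0', '0', '0', '1', '0']) := by simpa using hp1
  have hp2c : ¬(line.toList.take 8 = ['0', '1', '0', '0', '0', '0', '1', '1']) := by simpa using hp2
  have hp3c : ¬(line.toList.take 8 = ['0', '1', '0', '0', '0', '1', '0', '0']) := by simpa using hp3
  have hp4c : ¬(line.toList.take 8 = ['0', '1', '0', '0', '0', '1', '0', '1']) := by simpa using hp4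
  have hp5c : ¬(line.toList.take 8 = ['0', '1', '0', '0', '1', '0', '0', '0']) := by simpa using hp5
  have hp6c : ¬(line.toList.take 8 = ['0', '1', '0', '0', '1', '0', '0', '1']) := by simpa using hp6
  have ha : pvPrefixLoop line.toList pvPrefixOps = none := by
    simp [pvPrefixLoop, pvPrefixOps, pv_sw_take, hp1c, hp2c, hp3c, hp4c, hp5c, hp6c]
  have hs8_1 : ['0', '1', '0', '0', '0', '0', '1', '0'] ≠ List.take 8 line.toList := fun h => hp1c h.symm
  have hs8_2 : ['0', '1', '0', '0', '0', '0', '1', '1'] ≠ List.take 8 line.toList := fun h => hp2c h.symm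
  have hs8_3 : ['0', '1', '0', '0', '0', '1', '0', '0'] ≠ List.take 8 line.toList := fun h => hp3c h.symm
  have hs8_4 : ['0', '1', '0', '0', '0', '1', '0', '1'] ≠ List.take 8 line.toList := fun h => hp4c h.symm
  have hs8_5 : ['0', '1', '0', '0', '1', '0', '0', '0'] ≠ List.take 8 line.toList := fun h => hp5c h.symm
  have hs8_6 : ['0', '1', '0', '0', '1', '0', '0', '1'] ≠ List.take 8 line.toList := fun h => hp6c h.symm
  have hs8_7 : ['0', '0', '0', '0', '0', '0'] ≠ List.take 8 line.toList := fun h =>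
    hq (by rw [pv_take_eq_of_eq_short h.symm (by decide)]; decide)
  have hs8_8 : ['0', '0', '0', '0', '0', '1'] ≠ List.take 8 line.toList := fun h =>
    hq (by rw [pv_take_eq_of_eq_short h.symm (by decide)]; decide)
  have hs8_9 : ['0', '0', '0', '0', '1', '0'] ≠ List.take 8 line.toList := fun h =>
    hq (by rw [pv_take_eq_of_eq_short h.symm (by decide)]; decide)
  have hs8_10 : ['0', '0', '0', '0', '1', '1'] ≠ List.take 8 line.toList := fun h =>
    hq (by rw [pv_take_eq_of_eq_short h.symm (by decide)]; decide)
  have hs8_11 : ['0', '0', '0', '1', '0', '0'] ≠ List.take 8 line.toList := fun h =>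
    hq (by rw [pv_take_eq_of_eq_short h.symm (by decide)]; decide)
  have hs8_12 : ['0', '0', '1', '0', '0', '0'] ≠ List.take 8 line.toList := fun h =>
    hq (by rw [pv_take_eq_of_eq_short h.symm (by decide)]; decide)
  have hs8_13 : ['0', '0', '0', '1', '1', '1'] ≠ List.take 8 line.toList := fun h =>
    hq (by rw [pv_take_eq_of_eq_short h.symm (by decide)]; decide)
  have hs8_14 : ['1', '0', '0', '0', '1', '1'] ≠ List.take 8 line.toList := fun h =>
    hq (by rw [pv_take_eq_of_eq_short h.symm (by decide)]; decide)
  have hs8_15 : ['1', '0', '1', '0', '1', '1'] ≠ List.take 8 line.toList := fun h =>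
    hq (by rw [pv_take_eq_of_eq_short h.symm (by decide)]; decide)
  have hs8_16 : ['0', '0', '0', '1', '0', '1'] ≠ List.take 8 line.toList := fun h =>
    hq (by rw [pv_take_eq_of_eq_short h.symm (by decide)]; decide)
  have hs8_17 : ['0', '0', '0', '1', '1', '0'] ≠ List.take 8 line.toList := fun h =>
    hq (by rw [pv_take_eq_of_eq_short h.symm (by decide)]; decide)
  by_cases ho1 : line.toList.take 6 = "000000".toList
  · have ho1c : line.toList.take 6 = ['0', '0', '0', '0', '0', '0'] := by simpa using ho1
    rw [pv_slice8 line.toList, pv_slice06 line.toList, pv_slice6 line.toList]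
    simp [ha, ho1c, hs8_1, hs8_2, hs8_3, hs8_4, hs8_5, hs8_6, hs8_7, hs8_8, hs8_9, hs8_10, hs8_11, hs8_12, hs8_13, hs8_14, hs8_15, hs8_16, hs8_17, pvDispatch, pvSpecs, PySem.Dict.get?_mk_cons, pv_get?_nil, pvRender,
      pvRenderTok, PySem.Dict.getD_eq_get?_getD, pvOpCodes]
  by_cases ho2 : line.toList.take 6 = "000001".toList
  · have ho2c : line.toList.take 6 = ['0', '0', '0', '0', '0', '1'] := by simpa using ho2
    rw [pv_slice8 line.toList, pv_slice06 line.toList, pv_slice6 line.toList]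
    simp [ha, ho2c, hs8_1, hs8_2, hs8_3, hs8_4, hs8_5, hs8_6, hs8_7, hs8_8, hs8_9, hs8_10, hs8_11, hs8_12, hs8_13, hs8_14, hs8_15, hs8_16, hs8_17, pvDispatch, pvSpecs, PySem.Dict.get?_mk_cons, pv_get?_nil, pvRender,
      pvRenderTok, PySem.Dict.getD_eq_get?_getD, pvOpCodes]
  by_cases ho3 : line.toList.take 6 = "000010".toList
  · have ho3c : line.toList.take 6 = ['0', '0', '0', '0', '1', '0'] := by simpa using ho3
    rw [pv_slice8 line.toList, pv_slice06 line.toList, pv_slice6 line.toList]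
    simp [ha, ho3c, hs8_1, hs8_2, hs8_3, hs8_4, hs8_5, hs8_6, hs8_7, hs8_8, hs8_9, hs8_10, hs8_11, hs8_12, hs8_13, hs8_14, hs8_15, hs8_16, hs8_17, pvDispatch, pvSpecs, PySem.Dict.get?_mk_cons, pv_get?_nil, pvRender,
      pvRenderTok, PySem.Dict.getD_eq_get?_getD, pvOpCodes]
  by_cases ho4 : line.toList.take 6 = "000011".toList
  · have ho4c : line.toList.take 6 = ['0', '0', '0', '0', '1', '1'] := by simpa using ho4
    rw [pv_slice8 line.toList, pv_slice06 line.toList, pv_slice6 line.toList]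
    simp [ha, ho4c, hs8_1, hs8_2, hs8_3, hs8_4, hs8_5, hs8_6, hs8_7, hs8_8, hs8_9, hs8_10, hs8_11, hs8_12, hs8_13, hs8_14, hs8_15, hs8_16, hs8_17, pvDispatch, pvSpecs, PySem.Dict.get?_mk_cons, pv_get?_nil, pvRender,
      pvRenderTok, PySem.Dict.getD_eq_get?_getD, pvOpCodes]
  by_cases ho5 : line.toList.take 6 = "000100".toList
  · have ho5c : line.toList.take 6 = ['0', '0', '0', '1', '0', '0'] := by simpa using ho5
    rw [pv_slice8 line.toList, pv_slice06 line.toList, pv_slice6 line.toList]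
    simp [ha, ho5c, hs8_1, hs8_2, hs8_3, hs8_4, hs8_5, hs8_6, hs8_7, hs8_8, hs8_9, hs8_10, hs8_11, hs8_12, hs8_13, hs8_14, hs8_15, hs8_16, hs8_17, pvDispatch, pvSpecs, PySem.Dict.get?_mk_cons, pv_get?_nil, pvRender,
      pvRenderTok, PySem.Dict.getD_eq_get?_getD, pvOpCodes]
  by_cases ho6 : line.toList.take 6 = "001000".toList
  · have ho6c : line.toList.take 6 = ['0', '0', '1', '0', '0', '0'] := by simpa using ho6
    rw [pv_slice8 line.toList, pv_slice06 line.toList, pv_slice6 line.toList]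
    simp [ha, ho6c, hs8_1, hs8_2, hs8_3, hs8_4, hs8_5, hs8_6, hs8_7, hs8_8, hs8_9, hs8_10, hs8_11, hs8_12, hs8_13, hs8_14, hs8_15, hs8_16, hs8_17, pvDispatch, pvSpecs, PySem.Dict.get?_mk_cons, pv_get?_nil, pvRender,
      pvRenderTok, PySem.Dict.getD_eq_get?_getD, pvOpCodes]
  by_cases ho7 : line.toList.take 6 = "000111".toList
  · have ho7c : line.toList.take 6 = ['0', '0', '0', '1', '1', '1'] := by simpa using ho7
    rw [pv_slice8 line.toList, pv_slice06 line.toList, pv_slice6 line.toList]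
    simp [ha, ho7c, hs8_1, hs8_2, hs8_3, hs8_4, hs8_5, hs8_6, hs8_7, hs8_8, hs8_9, hs8_10, hs8_11, hs8_12, hs8_13, hs8_14, hs8_15, hs8_16, hs8_17, pvDispatch, pvSpecs, PySem.Dict.get?_mk_cons, pv_get?_nil, pvRender,
      pvRenderTok]
  by_cases ho8 : line.toList.take 6 = "100011".toList
  · have ho8c : line.toList.take 6 = ['1', '0', '0', '0', '1', '1'] := by simpa using ho8
    rw [pv_slice8 line.toList, pv_slice06 line.toList, pv_slice6 line.toList]
    simp [ha, ho8c, hs8_1, hs8_2, hs8_3, hs8_4, hs8_5, hs8_6, hs8_7, hs8_8, hs8_9, hs8_10, hs8_11, hs8_12, hs8_13, hs8_14, hs8_15, hs8_16, hs8_17, pvDispatch, pvSpecs, PySem.Dict.get?_mk_cons, pv_get?_nil, pvRender,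
      pvRenderTok, PySem.Dict.getD_eq_get?_getD, pvOpCodes]
  by_cases ho9 : line.toList.take 6 = "101011".toList
  · have ho9c : line.toList.take 6 = ['1', '0', '1', '0', '1', '1'] := by simpa using ho9
    rw [pv_slice8 line.toList, pv_slice06 line.toList, pv_slice6 line.toList]
    simp [ha, ho9c, hs8_1, hs8_2, hs8_3, hs8_4, hs8_5, hs8_6, hs8_7, hs8_8, hs8_9, hs8_10, hs8_11, hs8_12, hs8_13, hs8_14, hs8_15, hs8_16, hs8_17, pvDispatch, pvSpecs, PySem.Dict.get?_mk_cons, pv_get?_nil, pvRender,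
      pvRenderTok, PySem.Dict.getD_eq_get?_getD, pvOpCodes]
  by_cases ho10 : line.toList.take 6 = "000101".toList
  · have ho10c : line.toList.take 6 = ['0', '0', '0', '1', '0', '1'] := by simpa using ho10
    rw [pv_slice8 line.toList, pv_slice06 line.toList, pv_slice6 line.toList]
    simp [ha, ho10c, hs8_1, hs8_2, hs8_3, hs8_4, hs8_5, hs8_6, hs8_7, hs8_8, hs8_9, hs8_10, hs8_11, hs8_12, hs8_13, hs8_14, hs8_15, hs8_16, hs8_17, pvDispatch, pvSpecs, PySem.Dict.get?_mk_cons, pv_get?_nil, pvRender,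
      pvRenderTok]
  by_cases ho11 : line.toList.take 6 = "000110".toList
  · have ho11c : line.toList.take 6 = ['0', '0', '0', '1', '1', '0'] := by simpa using ho11
    rw [pv_slice8 line.toList, pv_slice06 line.toList, pv_slice6 line.toList]
    simp [ha, ho11c, hs8_1, hs8_2, hs8_3, hs8_4, hs8_5, hs8_6, hs8_7, hs8_8, hs8_9, hs8_10, hs8_11, hs8_12, hs8_13, hs8_14, hs8_15, hs8_16, hs8_17, pvDispatch, pvSpecs, PySem.Dict.get?_mk_cons, pv_get?_nil, pvRender,
      pvRenderTok]
  have ho1c : ¬(line.toList.take 6 = ['0', '0', '0', '0', '0', '0']) := by simpa using ho1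
  have ho2c : ¬(line.toList.take 6 = ['0', '0', '0', '0', '0', '1']) := by simpa using ho2
  have ho3c : ¬(line.toList.take 6 = ['0', '0', '0', '0', '1', '0']) := by simpa using ho3
  have ho4c : ¬(line.toList.take 6 = ['0', '0', '0', '0', '1', '1']) := by simpa using ho4
  have ho5c : ¬(line.toList.take 6 = ['0', '0', '0', '1', '0', '0']) := by simpa using ho5
  have ho6c : ¬(line.toList.take 6 = ['0', '0', '1', '0', '0', '0']) := by simpa using ho6
  have ho7c : ¬(line.toList.take 6 = ['0', '0', '0', '1', '1', '1']) := by simpa using ho7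
  have ho8c : ¬(line.toList.take 6 = ['1', '0', '0', '0', '1', '1']) := by simpa using ho8
  have ho9c : ¬(line.toList.take 6 = ['1', '0', '1', '0', '1', '1']) := by simpa using ho9
  have ho10c : ¬(line.toList.take 6 = ['0', '0', '0', '1', '0', '1']) := by simpa using ho10
  have ho11c : ¬(line.toList.take 6 = ['0', '0', '0', '1', '1', '0']) := by simpa using ho11
  have hs6p_1 : ['0', '1', '0', '0', '0', '0', '1', '0'] ≠ List.take 6 line.toList := fun h =>
    pv_take_ne_of_length_lt (by decide) h.symm
  have hs6p_2 : ['0', '1', '0', '0', '0', '0', '1', '1'] ≠ List.take 6 line.toList := fun h =>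
    pv_take_ne_of_length_lt (by decide) h.symm
  have hs6p_3 : ['0', '1', '0', '0', '0', '1', '0', '0'] ≠ List.take 6 line.toList := fun h =>
    pv_take_ne_of_length_lt (by decide) h.symm
  have hs6p_4 : ['0', '1', '0', '0', '0', '1', '0', '1'] ≠ List.take 6 line.toList := fun h =>
    pv_take_ne_of_length_lt (by decide) h.symm
  have hs6p_5 : ['0', '1', '0', '0', '1', '0', '0', '0'] ≠ List.take 6 line.toList := fun h =>
    pv_take_ne_of_length_lt (by decide) h.symm
  have hs6p_6 : ['0', '1', '0', '0', '1', '0', '0', '1'] ≠ List.take 6 line.toList := fun h =>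
    pv_take_ne_of_length_lt (by decide) h.symm
  have hs6_1 : ['0', '0', '0', '0', '0', '0'] ≠ List.take 6 line.toList := fun h => ho1c h.symm
  have hs6_2 : ['0', '0', '0', '0', '0', '1'] ≠ List.take 6 line.toList := fun h => ho2c h.symm
  have hs6_3 : ['0', '0', '0', '0', '1', '0'] ≠ List.take 6 line.toList := fun h => ho3c h.symm
  have hs6_4 : ['0', '0', '0', '0', '1', '1'] ≠ List.take 6 line.toList := fun h => ho4c h.symm
  have hs6_5 : ['0', '0', '0', '1', '0', '0'] ≠ List.take 6 line.toList := fun h => ho5c h.symm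
  have hs6_6 : ['0', '0', '1', '0', '0', '0'] ≠ List.take 6 line.toList := fun h => ho6c h.symm
  have hs6_7 : ['0', '0', '0', '1', '1', '1'] ≠ List.take 6 line.toList := fun h => ho7c h.symm
  have hs6_8 : ['1', '0', '0', '0', '1', '1'] ≠ List.take 6 line.toList := fun h => ho8c h.symm
  have hs6_9 : ['1', '0', '1', '0', '1', '1'] ≠ List.take 6 line.toList := fun h => ho9c h.symm
  have hs6_10 : ['0', '0', '0', '1', '0', '1'] ≠ List.take 6 line.toList := fun h => ho10c h.symm
  have hs6_11 : ['0', '0', '0', '1', '1', '0'] ≠ List.take 6 line.toList := fun h => ho11c h.symm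
  rw [pv_slice8 line.toList, pv_slice06 line.toList, pv_slice6 line.toList]
  simp [ha, hs8_1, hs8_2, hs8_3, hs8_4, hs8_5, hs8_6, hs8_7, hs8_8, hs8_9, hs8_10, hs8_11, hs8_12, hs8_13, hs8_14, hs8_15, hs8_16, hs8_17, hs6p_1, hs6p_2, hs6p_3, hs6p_4, hs6p_5, hs6p_6, hs6_1, hs6_2, hs6_3, hs6_4, hs6_5, hs6_6, hs6_7, hs6_8, hs6_9, hs6_10, hs6_11, ho1c, ho2c, ho3c, ho4c, ho5c, ho6c, ho7c, ho8c, ho9c, ho10c, ho11c, pvDispatch, pvSpecs,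
    PySem.Dict.get?_mk_cons, pv_get?_nil]
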